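-- pv_equiv track=rewrite | github.com/lilsweetcaligula/Online-Judges | hackerrank/algorithms/implementation/easy/happy_ladybugs/py/solution.py | solution
-- ===== SOURCE A (Python) =====
-- def solution(board):
--     import collections
--
--     count = 1
--
--     for pos in range(1, len(board) + 1):
--         if pos == len(board) or board[pos] != board[pos - 1]:
--             if count < 2:
--                 break
--             count = 1
--         else:
--             count += 1
--     else:
--         return True
--
--     ladybugs = ''.join(x for x in board if x != '_')
--     counts   = collections.Counter(ladybugs)
--
--     for x in counts:
--         if counts[x] < 2:
--             return False
--
--     return len(board) - len(ladybugs) > 0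
-- ===== SOURCE B (Python) =====
-- def solution(board):
--     if '_' in board:
--         from collections import Counter
--         return all(v >= 2 for c, v in Counter(board).items() if c != '_')
--     n = len(board)
--     return all((i > 0 and board[i] == board[i - 1])
--                or (i + 1 < n and board[i] == board[i + 1])
--                for i in range(n))
-- ===== Notes on version B (the rewrite author's own statement) =====
-- stated objective: simpler
-- what changed: B branches once on whether an underscore is present: with underscores it only checks every non-underscore color count is >= 2 via one Counter of the whole board, without underscores it checks every position has an equal neighbour; A's run-length for/else scan with its count state plus a Counter-over-filtered-string fallback and length arithmetic disappears.
import Mathlib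
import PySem

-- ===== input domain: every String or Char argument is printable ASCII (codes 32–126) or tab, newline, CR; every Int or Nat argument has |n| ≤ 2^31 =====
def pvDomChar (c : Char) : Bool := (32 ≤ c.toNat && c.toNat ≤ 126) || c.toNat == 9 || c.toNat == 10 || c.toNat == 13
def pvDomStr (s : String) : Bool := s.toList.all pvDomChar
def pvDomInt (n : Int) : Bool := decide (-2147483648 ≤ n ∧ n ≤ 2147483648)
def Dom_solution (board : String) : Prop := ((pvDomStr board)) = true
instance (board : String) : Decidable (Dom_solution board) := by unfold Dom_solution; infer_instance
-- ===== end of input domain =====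

-- B replaces A's run-length for/else scan plus Counter fallback by one branch on '_' membership: simpler decomposition.

-- ===== PORT A =====
-- the for/else run scan; every index read is in range (guarded by pos == length and pos ≥ 1), so List.getD is exact here
def solutionLoop (s : List Char) (pos : Nat) (count : Int) : Bool :=
  if h : s.length < pos then true
  else if pos == s.length || s.getD pos ' ' != s.getD (pos - 1) ' ' then
    if count < 2 then false
    else solutionLoop s (pos + 1) 1
  else solutionLoop s (pos + 1) (count + 1)
termination_by s.length + 1 - pos
decreasing_by all_goals omega

def solution (board : String) : Bool :=
  let s := board.toList
  if solutionLoop s 1 1 then true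
  else
    let ladybugs := s.filter (fun x => x != '_')
    let counts := PySem.Dict.counter ladybugs
    if counts.keys.any (fun x => counts.getD x 0 < 2) then false
    else decide ((s.length : Int) - (ladybugs.length : Int) > 0)

-- ===== PORT B =====
def solution_alt (board : String) : Bool :=
  let s := board.toList
  if s.contains '_' then
    (PySem.Dict.counter s).items.all (fun cv => cv.1 == '_' || decide ((2 : Int) ≤ cv.2))
  else
    (List.range s.length).all (fun i =>
      (decide (0 < i) && (s.getD i ' ' == s.getD (i - 1) ' ')) ||
      (decide (i + 1 < s.length) && (s.getD i ' ' == s.getD (i + 1) ' ')))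

-- ===== PRECONDITION & SPEC =====
def Spec_solution (board : String) (out : Bool) : Prop := out = solution_alt board
instance (board : String) (out : Bool) : Decidable (Spec_solution board out) := by unfold Spec_solution; infer_instance

-- ===== CLAIM (what is proved, stated in full; the proofs are below) =====
def Claim_equal_solution : Prop := ∀ (board : String), Dom_solution board → Spec_solution board (solution board)

-- ===== LEMMAS AND PROOFS =====

-- position i of s has an equal neighbour (the body of B's per-index check)
def nb (s : List Char) (i : Nat) : Bool :=
  (decide (0 < i) && (s.getD i ' ' == s.getD (i - 1) ' ')) ||
  (decide (i + 1 < s.length) && (s.getD i ' ' == s.getD (i + 1) ' '))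

theorem two_le_count (s : List Char) (i j : Nat) (hj : j < s.length) (hij : i < j)
    (h : s.getD i ' ' = s.getD j ' ') : 2 ≤ s.count (s.getD i ' ') := by
  have hi : i < s.length := by omega
  have hvi : s.getD i ' ' ∈ s.take j := by
    refine List.mem_iff_getElem.mpr ⟨i, by simp; omega, ?_⟩
    rw [List.getElem_take, List.getD_eq_getElem s ' ' hi]
  have hvj : s.getD i ' ' ∈ s.drop j := by
    refine List.mem_iff_getElem.mpr ⟨0, by simp; omega, ?_⟩
    rw [List.getElem_drop, h, List.getD_eq_getElem s ' ' hj]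
    simp
  have h2 : 2 ≤ (s.take j ++ s.drop j).count (s.getD i ' ') := by
    rw [List.count_append]
    have a1 := List.count_pos_iff.mpr hvi
    have a2 := List.count_pos_iff.mpr hvj
    omega
  simpa [List.take_append_drop] using h2

theorem solutionLoop_char (s : List Char) (pos : Nat) (count : Int)
    (h1 : 1 ≤ pos) (h2 : pos ≤ s.length) (hc1 : 1 ≤ count) (hc2 : count ≤ (pos : Int))
    (hrun : ∀ k, pos - count.toNat ≤ k → k < pos → s.getD k ' ' = s.getD (pos - 1) ' ')
    (hbd : pos - count.toNat = 0 ∨ s.getD (pos - count.toNat - 1) ' ' ≠ s.getD (pos - count.toNat) ' ') :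
    solutionLoop s pos count = true ↔ (∀ i, pos - count.toNat ≤ i → i < s.length → nb s i = true) := by
  have hcN : 1 ≤ count.toNat ∧ count.toNat ≤ pos := by omega
  rw [solutionLoop, dif_neg (by omega : ¬ s.length < pos)]
  by_cases hA : (pos == s.length || s.getD pos ' ' != s.getD (pos - 1) ' ') = true
  · rw [if_pos hA]
    by_cases hlt : count < 2
    · rw [if_pos (by simpa using hlt)]
      have hc1' : count.toNat = 1 := by omega
      have hnb : nb s (pos - 1) ≠ true := by
        intro hcon
        simp only [nb, Bool.or_eq_true, Bool.and_eq_true, decide_eq_true_eq, beq_iff_eq] at hcon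
        rcases hcon with ⟨hi, he⟩ | ⟨hi, he⟩
        · rcases hbd with hb | hb
          · omega
          · have e1 : pos - count.toNat - 1 = pos - 1 - 1 := by omega
            have e2 : pos - count.toNat = pos - 1 := by omega
            rw [e1, e2] at hb
            exact hb he.symm
        · simp only [beq_iff_eq, bne_iff_ne, Bool.or_eq_true, ne_eq] at hA
          have hpos : pos - 1 + 1 = pos := by omega
          rcases hA with hA | hA
          · omega
          · exact hA (by rw [← hpos] at he ⊢; exact he.symm)
      constructor
      · intro h
        exact absurd h (by simp)
      · intro hall
        exact absurd (hall (pos - 1) (by omega) (by omega)) hnb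
    · rw [if_neg (by simpa using hlt)]
      have hmid : ∀ i, pos - count.toNat ≤ i → i < pos → nb s i = true := by
        intro i hi1 hi2
        simp only [nb, Bool.or_eq_true, Bool.and_eq_true, decide_eq_true_eq, beq_iff_eq]
        by_cases hir : i = pos - count.toNat
        · right
          exact ⟨by omega, by rw [hrun i hi1 hi2, hrun (i+1) (by omega) (by omega)]⟩
        · left
          exact ⟨by omega, by rw [hrun i hi1 hi2, hrun (i-1) (by omega) (by omega)]⟩
      by_cases hend : pos = s.length
      · rw [solutionLoop, dif_pos (by omega : s.length < pos + 1)]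
        constructor
        · intro _ i hi1 hi2
          exact hmid i hi1 (by omega)
        · intro _
          rfl
      · simp only [beq_iff_eq, bne_iff_ne, Bool.or_eq_true, ne_eq] at hA
        replace hA : s.getD pos ' ' ≠ s.getD (pos - 1) ' ' := by tauto
        rw [solutionLoop_char s (pos + 1) 1 (by omega) (by omega) (by norm_num)
          (by exact_mod_cast Nat.cast_le.mpr (by omega : 1 ≤ pos + 1))
          (by intro k hk1 hk2
              have hk : k = pos := by omega
              have hp : pos + 1 - 1 = pos := by omega
              rw [hk, hp])
          (by right
              have e1 : pos + 1 - (1:Int).toNat - 1 = pos - 1 := by simp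
              have e2 : pos + 1 - (1:Int).toNat = pos := by simp
              rw [e1, e2]
              exact fun hcon => hA hcon.symm)]
        constructor
        · intro h i hi1 hi2
          by_cases hip : i < pos
          · exact hmid i hi1 hip
          · exact h i (by omega) hi2
        · intro h i hi1 hi2
          exact h i (by omega) hi2
  · rw [if_neg hA]
    simp only [beq_iff_eq, bne_iff_ne, Bool.or_eq_true, ne_eq, not_or, not_not] at hA
    obtain ⟨hne, heq⟩ := hA
    have htn : (count + 1).toNat = count.toNat + 1 := by omega
    rw [solutionLoop_char s (pos + 1) (count + 1) (by omega) (by omega) (by omega) (by push_cast; omega)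
      (by intro k hk1 hk2
          rw [htn] at hk1
          have hp : pos + 1 - 1 = pos := by omega
          rw [hp, heq]
          by_cases hkp : k = pos
          · rw [hkp]
            exact heq
          · exact hrun k (by omega) (by omega))
      (by rw [htn]
          have e : pos + 1 - (count.toNat + 1) = pos - count.toNat := by omega
          rw [e]
          exact hbd)]
    rw [htn]
    have e : pos + 1 - (count.toNat + 1) = pos - count.toNat := by omega
    rw [e]
termination_by s.length + 1 - pos
decreasing_by all_goals omega

theorem loop_top (s : List Char) (hs : s ≠ []) :
    solutionLoop s 1 1 = true ↔ (∀ i, i < s.length → nb s i = true) := by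
  have hlen : 0 < s.length := List.length_pos_iff.mpr hs
  rw [solutionLoop_char s 1 1 (le_refl 1) (by omega) (le_refl 1) (by norm_num)
    (by intro k hk1 hk2
        have hk : k = 0 := by omega
        rw [hk])
    (Or.inl (by simp))]
  constructor
  · intro h i hi
    exact h i (by omega) hi
  · intro h i _ hi
    exact h i hi

-- every position having an equal neighbour forces every character to occur at least twice
theorem p1_to_p2 (s : List Char) (h : ∀ i, i < s.length → nb s i = true) :
    ∀ c ∈ s, 2 ≤ s.count c := by
  intro c hc
  obtain ⟨i, hi, hci⟩ := List.mem_iff_getElem.mp hc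
  have hcd : c = s.getD i ' ' := by rw [List.getD_eq_getElem s ' ' hi, hci]
  have := h i hi
  simp only [nb, Bool.or_eq_true, Bool.and_eq_true, decide_eq_true_eq, beq_iff_eq] at this
  rcases this with ⟨h0, he⟩ | ⟨h0, he⟩
  · have h2 := two_le_count s (i - 1) i hi (by omega) he.symm
    rw [he.symm] at h2
    rw [hcd]
    exact h2
  · rw [hcd]
    exact two_le_count s i (i + 1) h0 (by omega) he

-- A's Counter pass over the non-underscore characters, as a proposition
theorem a_any_iff (l : List Char) :
    ((PySem.Dict.counter l).keys.any
        (fun x => decide ((PySem.Dict.counter l).getD x 0 < 2)) = false) ↔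
      (∀ c ∈ l, 2 ≤ l.count c) := by
  rw [List.any_eq_false]
  constructor
  · intro h c hc
    have := h c (by rw [PySem.Dict.keys_counter]; exact (PySem.Set.mem_ofList l c).mpr hc)
    rw [PySem.Dict.getD_counter] at this
    simp only [decide_eq_true_eq, not_lt] at this
    exact_mod_cast this
  · intro h x hx
    rw [PySem.Dict.keys_counter] at hx
    have := h x ((PySem.Set.mem_ofList l x).mp hx)
    rw [PySem.Dict.getD_counter]
    simp only [decide_eq_true_eq, not_lt]
    exact_mod_cast this

-- B's Counter pass (skipping '_'), as a proposition
theorem b_all_iff (s : List Char) :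
    ((PySem.Dict.counter s).items.all
        (fun cv => cv.1 == '_' || decide ((2 : Int) ≤ cv.2)) = true) ↔
      (∀ c ∈ s, c ≠ '_' → 2 ≤ s.count c) := by
  rw [PySem.Dict.items_counter, List.all_map, List.all_eq_true]
  constructor
  · intro h c hc hne
    have := h c ((PySem.Set.mem_ofList s c).mpr hc)
    simp only [Function.comp, Bool.or_eq_true, beq_iff_eq, decide_eq_true_eq] at this
    rcases this with h' | h'
    · exact absurd h' hne
    · exact_mod_cast h'
  · intro h x hx
    simp only [Function.comp, Bool.or_eq_true, beq_iff_eq, decide_eq_true_eq]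
    by_cases hu : x = '_'
    · exact Or.inl hu
    · right
      exact_mod_cast h x ((PySem.Set.mem_ofList s x).mp hx) hu

-- counting in the filtered list equals counting in the whole list, for non-underscore characters
theorem p2_transfer (s : List Char) :
    (∀ c ∈ s.filter (fun x => x != '_'), 2 ≤ (s.filter (fun x => x != '_')).count c) ↔
      (∀ c ∈ s, c ≠ '_' → 2 ≤ s.count c) := by
  constructor
  · intro h c hc hne
    have hmem : c ∈ s.filter (fun x => x != '_') :=
      List.mem_filter.mpr ⟨hc, by simpa using hne⟩
    have hcf := List.count_filter (p := fun x => x != '_') (a := c) (l := s) (by simpa using hne)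
    have := h c hmem
    rwa [hcf] at this
  · intro h c hc
    obtain ⟨hcs, hp⟩ := List.mem_filter.mp hc
    rw [List.count_filter (p := fun x => x != '_') (a := c) (l := s) hp]
    exact h c hcs (by simpa using hp)

-- B's grouping pass over range, as a proposition
theorem range_all_iff (s : List Char) :
    (((List.range s.length).all (fun i =>
        (decide (0 < i) && (s.getD i ' ' == s.getD (i - 1) ' ')) ||
        (decide (i + 1 < s.length) && (s.getD i ' ' == s.getD (i + 1) ' ')))) = true) ↔
      (∀ i, i < s.length → nb s i = true) := by
  simp only [List.all_eq_true, List.mem_range, nb]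

-- ===== VERDICT (by name: the statement is the Claim_ definition above) =====
theorem solution_spec : Claim_equal_solution := by
  intro board _
  unfold Spec_solution
  simp only [solution, solution_alt]
  by_cases hnil : board.toList = []
  · rw [hnil]
    rw [show solutionLoop ([] : List Char) 1 1 = true from by rw [solutionLoop]; simp]
    simp
  · by_cases hu : '_' ∈ board.toList
    · have hcont : board.toList.contains '_' = true := by simpa using hu
      have hlen : (board.toList.filter (fun x => x != '_')).length < board.toList.length :=
        List.length_filter_lt_length_iff_exists.mpr ⟨'_', hu, by simp⟩
      by_cases hP1 : ∀ i, i < board.toList.length → nb board.toList i = true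
      · have hL : solutionLoop board.toList 1 1 = true := (loop_top _ hnil).mpr hP1
        have hB := (b_all_iff board.toList).mpr (fun c hc _ => p1_to_p2 _ hP1 c hc)
        rw [hL, hcont, hB]
        simp
      · have hL : solutionLoop board.toList 1 1 = false :=
          Bool.eq_false_iff.mpr (fun h => hP1 ((loop_top _ hnil).mp h))
        rw [hL, hcont]
        by_cases hQ : ∀ c ∈ board.toList, c ≠ '_' → 2 ≤ board.toList.count c
        · have hA := (a_any_iff (board.toList.filter (fun x => x != '_'))).mpr
            ((p2_transfer board.toList).mpr hQ)
          have hB := (b_all_iff board.toList).mpr hQ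
          have hD : decide ((board.toList.length : Int) -
              ((board.toList.filter (fun x => x != '_')).length : Int) > 0) = true :=
            decide_eq_true (by omega)
          rw [hA, hB, hD]
          simp
        · have hA : ((PySem.Dict.counter (board.toList.filter (fun x => x != '_'))).keys.any
              (fun x => decide ((PySem.Dict.counter
                (board.toList.filter (fun x => x != '_'))).getD x 0 < 2))) = true := by
            rcases Bool.eq_false_or_eq_true ((PySem.Dict.counter
                (board.toList.filter (fun x => x != '_'))).keys.any
              (fun x => decide ((PySem.Dict.counter
                (board.toList.filter (fun x => x != '_'))).getD x 0 < 2))) with h1 | h1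
            · exact h1
            · exact absurd ((p2_transfer board.toList).mp
                ((a_any_iff (board.toList.filter (fun x => x != '_'))).mp h1)) hQ
          have hB : ((PySem.Dict.counter board.toList).items.all
              (fun cv => cv.1 == '_' || decide ((2 : Int) ≤ cv.2))) = false :=
            Bool.eq_false_iff.mpr (fun h => hQ ((b_all_iff board.toList).mp h))
          rw [hA, hB]
          simp
    · have hcont : board.toList.contains '_' = false := by simpa using hu
      have hlady : board.toList.filter (fun x => x != '_') = board.toList :=
        List.filter_eq_self.mpr (fun x hx => by
          simp only [bne_iff_ne, ne_eq]
          intro h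
          exact hu (h ▸ hx))
      rw [hcont, hlady]
      by_cases hP1 : ∀ i, i < board.toList.length → nb board.toList i = true
      · have hL : solutionLoop board.toList 1 1 = true := (loop_top _ hnil).mpr hP1
        rw [hL]
        simp only [if_true]
        rw [((range_all_iff board.toList).mpr hP1)]
        simp
      · have hL : solutionLoop board.toList 1 1 = false :=
          Bool.eq_false_iff.mpr (fun h => hP1 ((loop_top _ hnil).mp h))
        have hR : (((List.range board.toList.length).all (fun i =>
            (decide (0 < i) && (board.toList.getD i ' ' == board.toList.getD (i - 1) ' ')) ||
            (decide (i + 1 < board.toList.length) &&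
              (board.toList.getD i ' ' == board.toList.getD (i + 1) ' ')))) = false) :=
          Bool.eq_false_iff.mpr (fun h => hP1 ((range_all_iff board.toList).mp h))
        have hD : decide ((board.toList.length : Int) - (board.toList.length : Int) > 0) = false :=
          decide_eq_false (by omega)
        rw [hL, hR, hD]
        cases hany : ((PySem.Dict.counter board.toList).keys.any
            (fun x => decide ((PySem.Dict.counter board.toList).getD x 0 < 2))) <;> simp
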